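-- pv_equiv track=rewrite | github.com/VirendraChvan/E-Vakeel | vakilapp/views.py | has_alpha_num_sym
-- ===== SOURCE A (Python) =====
-- def has_alpha_num_sym(input_string):
--     has_alpha = False
--     has_num = False
--     has_sym=False
--
--     for char in input_string:
--         if char.isalpha():
--             has_alpha = True
--         elif char.isdigit():
--             has_num = True
--         if not char.isalnum():
--             has_sym=True
--
--     return has_alpha and has_num and has_sym
-- ===== SOURCE B (Python) =====
-- def has_alpha_num_sym(input_string):
--     has_alpha = any(c.isalpha() for c in input_string)
--     has_num = any(c.isdigit() for c in input_string)
--     has_sym = any(not c.isalnum() for c in input_string)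
--     return has_alpha and has_num and has_sym
-- ===== Notes on version B (the rewrite author's own statement) =====
-- stated objective: idiomatic
-- what changed: Replaced the single fused flag-accumulating loop with three independent any() existence checks, one scan per property.
import Mathlib
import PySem

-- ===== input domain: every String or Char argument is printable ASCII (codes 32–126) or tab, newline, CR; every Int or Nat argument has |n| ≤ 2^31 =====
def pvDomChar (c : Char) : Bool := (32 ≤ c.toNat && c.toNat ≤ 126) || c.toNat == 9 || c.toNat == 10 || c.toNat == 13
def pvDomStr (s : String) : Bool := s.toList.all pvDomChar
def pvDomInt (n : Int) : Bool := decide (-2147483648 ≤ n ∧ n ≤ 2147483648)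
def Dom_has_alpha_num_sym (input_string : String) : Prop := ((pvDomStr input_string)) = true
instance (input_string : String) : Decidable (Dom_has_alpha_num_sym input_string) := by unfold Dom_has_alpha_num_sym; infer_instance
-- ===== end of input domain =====

-- B replaces A's single fused flag-accumulating loop by three independent any-existence scans (idiomatic; same cost).

-- ===== PORT A =====
-- state = (has_alpha, has_num, has_sym); branches in Python's order (if/elif, then the isalnum check)
def has_alpha_num_sym (input_string : String) : Bool :=
  let st := input_string.toList.foldl
    (fun (st : Bool × Bool × Bool) c =>
      let st1 :=
        if PySem.Chars.isalpha c then (true, st.2.1, st.2.2)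
        else if PySem.Chars.isdigit c then (st.1, true, st.2.2)
        else st
      if !PySem.Chars.isalnum c then (st1.1, st1.2.1, true) else st1)
    (false, false, false)
  st.1 && st.2.1 && st.2.2

-- ===== PORT B =====
def has_alpha_num_sym_alt (input_string : String) : Bool :=
  let has_alpha := input_string.toList.any (fun c => PySem.Chars.isalpha c)
  let has_num := input_string.toList.any (fun c => PySem.Chars.isdigit c)
  let has_sym := input_string.toList.any (fun c => !PySem.Chars.isalnum c)
  has_alpha && has_num && has_sym

-- ===== PRECONDITION & SPEC =====
def Spec_has_alpha_num_sym (input_string : String) (out : Bool) : Prop := out = has_alpha_num_sym_alt input_string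
instance (input_string : String) (out : Bool) : Decidable (Spec_has_alpha_num_sym input_string out) := by unfold Spec_has_alpha_num_sym; infer_instance

-- ===== CLAIM (what is proved, stated in full; the proofs are below) =====
def Claim_equal_has_alpha_num_sym : Prop := ∀ (input_string : String), Dom_has_alpha_num_sym input_string → Spec_has_alpha_num_sym input_string (has_alpha_num_sym input_string)

-- ===== LEMMAS AND PROOFS =====

theorem pv_digit_not_alpha (c : Char) (h : PySem.Chars.isdigit c = true) :
    PySem.Chars.isalpha c = false := by
  simp [PySem.Chars.isdigit, Char.le_def, UInt32.le_iff_toNat_le] at h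
  simp [PySem.Chars.isalpha, PySem.Chars.isupper, PySem.Chars.islower, Char.le_def,
    UInt32.le_iff_toNat_le]
  omega

-- the fold's invariant: each flag is the initial flag OR'd with the corresponding existence check
theorem pv_fold_char (l : List Char) (st : Bool × Bool × Bool) :
    l.foldl
      (fun (st : Bool × Bool × Bool) c =>
        let st1 :=
          if PySem.Chars.isalpha c then (true, st.2.1, st.2.2)
          else if PySem.Chars.isdigit c then (st.1, true, st.2.2)
          else st
        if !PySem.Chars.isalnum c then (st1.1, st1.2.1, true) else st1)
      st
    = (st.1 || l.any (fun c => PySem.Chars.isalpha c),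
       st.2.1 || l.any (fun c => PySem.Chars.isdigit c),
       st.2.2 || l.any (fun c => !PySem.Chars.isalnum c)) := by
  induction l generalizing st with
  | nil => simp
  | cons c l ih =>
    simp only [List.foldl_cons, List.any_cons, ih]
    by_cases ha : PySem.Chars.isalpha c = true
    · have hd : PySem.Chars.isdigit c = false := by
        by_cases h : PySem.Chars.isdigit c = true
        · exact absurd ha (by simp [pv_digit_not_alpha c h])
        · simpa using h
      simp [ha, hd, PySem.Chars.isalnum]
    · by_cases hdg : PySem.Chars.isdigit c = true
      · simp [ha, hdg, PySem.Chars.isalnum]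
      · simp [ha, hdg, PySem.Chars.isalnum, Bool.or_comm]

-- ===== VERDICT (by name: the statement is the Claim_ definition above) =====
theorem has_alpha_num_sym_spec : Claim_equal_has_alpha_num_sym := by
  intro s _
  show has_alpha_num_sym s = has_alpha_num_sym_alt s
  unfold has_alpha_num_sym has_alpha_num_sym_alt
  rw [pv_fold_char]
  simp
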